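-- pv_equiv track=rewrite | github.com/GuttmanLab/sprite2.0-pipeline | sprite-pipeline/barcode_correction.py | get_barcodes2merge
-- ===== SOURCE A (Python) =====
-- from collections import defaultdict, Counter
-- from itertools import combinations
--
-- def make_N_minus_X_barcodes(barcodes, X=1):
--     '''For each barcode, make all N-X possible barcodes
--     '''
--     # bc = 'R8-1_TermStag_bot_7|R7-2_bot_A1|R6-1_bot_B9|R5-2_bot_A3|R4-2_bot_A7|R3-1_bot_A5|R2-2_bot_B4|R1-1_bot_A2'
--     bc_minus_x = defaultdict(set)
--     for bc in barcodes.keys():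
--         bc_lst = bc.split('|')
--         items_to_remove = list(combinations(range(0,8),X))
--         for y in items_to_remove:
--             keep_items = [list(range(0,len(bc_lst)))[i] for i in range(0,len(bc_lst)) if i not in y]
--             bc_minus_x[bc].add('|'.join([bc_lst[i] for i in keep_items]))
--     return bc_minus_x
--
-- def get_barcodes2merge(barcodes, x=1):
--     '''Get combination of barcodes that should be merged (i.e. )
--     '''
--
--     all_n1_bc = make_N_minus_X_barcodes(barcodes, x)
--
--     #make inverted dict, this will give all the barcodes with N-1 differences
--     invrt_all_n1_bc = defaultdict(set)
--     for key, values in all_n1_bc.items():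
--         for i in values:
--             invrt_all_n1_bc[i].add(key)
--
--     #Merge all keys into barcode groups
--     merged_barcodes = []
--     for key, values in all_n1_bc.items():
--         barcode_set = set()
--         for item in values:
--             for i in invrt_all_n1_bc.get(item):
--                 barcode_set.add(i)
--         merged_barcodes.append(barcode_set)
--
--     return merged_barcodes
-- ===== SOURCE B (Python) =====
-- from itertools import combinations
--
-- def get_barcodes2merge(barcodes, x=1):
--     '''Group each barcode with every barcode sharing an N-x variant by a
--     brute-force all-pairs variant comparison: no variant->barcodes dicts
--     are built at all, each barcode's variant list is compared directly
--     against every other barcode's.'''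
--     combos = list(combinations(range(0, 8), x))
--     if not combos:
--         return []
--
--     def variants(bc):
--         parts = bc.split('|')
--         out = []
--         for y in combos:
--             v = '|'.join(p for i, p in enumerate(parts) if i not in y)
--             if v not in out:
--                 out.append(v)
--         return out
--
--     pairs = [(k, variants(k)) for k in barcodes]
--     result = []
--     for bc, vs in pairs:
--         group = set()
--         for v in vs:
--             for k, kvs in pairs:
--                 if v in kvs:
--                     group.add(k)
--         result.append(group)
--     return result
-- ===== Notes on version B (the rewrite author's own statement) =====
-- stated objective: alternative
-- what changed: B drops both of A's dictionaries (the per-barcode variant-set dict and the inverted variant->barcodes dict built in a second pass): it computes each barcode's deduplicated variant list once, then finds each barcode's group by a direct all-pairs scan testing every other barcode's variant list for a shared variant; this is quadratic in the number of barcodes where A is linear, but per barcode B builds each variant in one enumerate pass where A re-materializes list(range(len)) for every kept element, so B is linear instead of quadratic in barcode length.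
-- outside the precondition, e.g. on get_barcodes2merge({}, -1): A returns [], B raises ValueError
import Mathlib
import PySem

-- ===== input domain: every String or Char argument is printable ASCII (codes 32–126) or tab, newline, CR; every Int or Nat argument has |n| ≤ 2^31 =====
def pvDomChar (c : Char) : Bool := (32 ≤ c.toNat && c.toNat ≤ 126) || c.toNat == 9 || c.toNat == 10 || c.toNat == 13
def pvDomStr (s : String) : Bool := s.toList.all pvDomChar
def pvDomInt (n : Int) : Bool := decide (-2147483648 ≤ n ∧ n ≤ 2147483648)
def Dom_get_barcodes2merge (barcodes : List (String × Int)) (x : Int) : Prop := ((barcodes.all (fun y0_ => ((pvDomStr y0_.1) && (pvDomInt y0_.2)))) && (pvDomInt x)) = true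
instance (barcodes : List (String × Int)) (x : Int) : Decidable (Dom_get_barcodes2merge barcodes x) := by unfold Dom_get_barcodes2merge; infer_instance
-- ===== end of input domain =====

-- B drops A's two dictionaries (per-barcode variant-set dict and the inverted variant→barcodes
-- dict) and finds each barcode's group by a direct all-pairs scan over precomputed variant lists
-- (objective: alternative, index-free; a timing run measured B faster on the generated inputs).
-- Equality proved on Pre_ (0 ≤ x).

-- itertools.combinations(l, r), in itertools' emission order (shared library helper of both ports)
def pyCombinations : List Int → Nat → List (List Int)
  | _, 0 => [[]]
  | [], _ + 1 => []
  | a :: as, r + 1 => (pyCombinations as r).map (fun c => a :: c) ++ pyCombinations as (r + 1)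

-- bc.split('|') (sep is nonempty, so split? is always `some`: the getD is never taken)
def pvSplitBar (s : String) : List String := (PySem.Str.split? s "|").getD []

-- ===== PORT A =====
-- A's inner comprehensions for one removal tuple y:
-- keep_items = [list(range(0,len))[i] for i in range(0,len) if i not in y]; '|'.join([bc_lst[i] for i in keep_items])
def pvVariantA (bc : String) (y : List Int) : String :=
  let bc_lst := pvSplitBar bc
  let keep_items :=
    ((PySem.List.pyRange 0 (PySem.List.len bc_lst)).filter (fun i => !decide (i ∈ y))).map
      (fun i => PySem.List.pyGetD (PySem.List.pyRange 0 (PySem.List.len bc_lst)) i 0)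
  PySem.Str.join "|" (keep_items.map (fun i => PySem.List.pyGetD bc_lst i ""))

def make_N_minus_X_barcodes (keys : List String) (X : Int) : PySem.Dict String (PySem.Set String) :=
  keys.foldl (fun d bc =>
    (pyCombinations (PySem.List.pyRange 0 8) X.toNat).foldl
      (fun d y => d.modify bc [] (fun s => PySem.Set.add s (pvVariantA bc y))) d)
    PySem.Dict.empty

def get_barcodes2merge (barcodes : List (String × Int)) (x : Int) : List (List String) :=
  let all_n1_bc := make_N_minus_X_barcodes (PySem.List.dedup (barcodes.map Prod.fst)) x
  let invrt := all_n1_bc.items.foldl (fun d kv =>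
      kv.2.foldl (fun d i => d.modify i [] (fun s => PySem.Set.add s kv.1)) d) PySem.Dict.empty
  all_n1_bc.items.foldl (fun acc kv =>
      acc ++ [kv.2.foldl (fun s item =>
        (invrt.getD item []).foldl (fun s i => PySem.Set.add s i) s) PySem.Set.empty]) []

-- ===== PORT B =====
-- B's variant string: '|'.join(p for i, p in enumerate(parts) if i not in y)
def pvVariantB (parts : List String) (y : List Int) : String :=
  PySem.Str.join "|" (((PySem.List.enumerate parts).filter (fun p => !decide (p.1 ∈ y))).map (fun p => p.2))

-- B's variants(bc): deduplicated list of variant strings, in first-occurrence order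
def pvVariantsB (combos : List (List Int)) (bc : String) : List String :=
  let parts := pvSplitBar bc
  combos.foldl (fun out y =>
    let v := pvVariantB parts y
    if v ∈ out then out else out ++ [v]) []

def get_barcodes2merge_alt (barcodes : List (String × Int)) (x : Int) : List (List String) :=
  let combos := pyCombinations (PySem.List.pyRange 0 8) x.toNat
  if combos = [] then []
  else
    let pairs := (PySem.List.dedup (barcodes.map Prod.fst)).map
      (fun k => (k, pvVariantsB combos k))
    pairs.map (fun p =>
      p.2.foldl (fun g v =>
        pairs.foldl (fun g q => if v ∈ q.2 then PySem.Set.add g q.1 else g) g)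
        PySem.Set.empty)

-- ===== PRECONDITION & SPEC =====
-- Pre_ excludes negative x: there A raises ValueError (combinations with r < 0), except that with
-- no barcodes at all A never reaches the combinations call and accidentally returns []; B computes
-- the combination list up front and raises there too.
def Pre_get_barcodes2merge (barcodes : List (String × Int)) (x : Int) : Prop := 0 ≤ x
instance (barcodes : List (String × Int)) (x : Int) : Decidable (Pre_get_barcodes2merge barcodes x) := by unfold Pre_get_barcodes2merge; infer_instance
def pvWitness_get_barcodes2merge : (List (String × Int)) × Int := ([("ab|cd", 1), ("ab|ce", 2)], 1)

def Spec_get_barcodes2merge (barcodes : List (String × Int)) (x : Int) (out : List (List String)) : Prop := out = get_barcodes2merge_alt barcodes x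
instance (barcodes : List (String × Int)) (x : Int) (out : List (List String)) : Decidable (Spec_get_barcodes2merge barcodes x out) := by unfold Spec_get_barcodes2merge; infer_instance

-- ===== CLAIM (what is proved, stated in full; the proofs are below) =====
def Claim_equal_get_barcodes2merge : Prop := ∀ (barcodes : List (String × Int)) (x : Int), Dom_get_barcodes2merge barcodes x → Pre_get_barcodes2merge barcodes x → Spec_get_barcodes2merge barcodes x (get_barcodes2merge barcodes x)

-- ===== LEMMAS AND PROOFS =====

-- indexing the identity list: list(range(0,n))[i] = i for 0 ≤ i < n
lemma pv_getD_range (n : Nat) (i : Int) (h0 : 0 ≤ i) (h1 : i < (n : Int)) :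
    PySem.List.pyGetD (PySem.List.pyRange 0 (n : Int)) i 0 = i := by
  obtain ⟨k, rfl⟩ : ∃ k : Nat, i = (k : Int) := ⟨i.toNat, (Int.toNat_of_nonneg h0).symm⟩
  rw [PySem.List.pyRange_zero_natCast, PySem.List.pyGetD_natCast]
  have hk : k < n := by exact_mod_cast h1
  simp [List.getD_eq_getElem?_getD, hk]

-- A's double-indexed comprehension and B's enumerate comprehension build the same variant string
lemma pv_var_eq (bc : String) (y : List Int) :
    pvVariantA bc y = pvVariantB (pvSplitBar bc) y := by
  unfold pvVariantA pvVariantB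
  rw [PySem.List.enumerate_eq_map_pyRange (pvSplitBar bc) ""]
  simp only [List.filter_map, List.map_map]
  refine congrArg _ (List.map_congr_left ?_)
  intro i hi
  have hmem : i ∈ PySem.List.pyRange 0 (PySem.List.len (pvSplitBar bc)) := (List.mem_filter.mp hi).1
  have hb := PySem.List.mem_pyRange_one.mp hmem
  have hlen : PySem.List.len (pvSplitBar bc) = ((pvSplitBar bc).length : Int) := rfl
  rw [hlen] at hb
  rw [hlen]
  simp only [Function.comp_apply]
  rw [pv_getD_range (pvSplitBar bc).length i hb.1 hb.2]

-- B's membership-guarded accumulation is exactly set() insertion order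
lemma pv_varsB_eq (combos : List (List Int)) (bc : String) :
    pvVariantsB combos bc = PySem.Set.ofList (combos.map (pvVariantA bc)) := by
  unfold pvVariantsB
  rw [PySem.Set.ofList_eq_foldl, List.foldl_map]
  refine List.foldl_ext _ _ _ ?_
  intro s y _
  rw [pv_var_eq]
  by_cases h : pvVariantB (pvSplitBar bc) y ∈ s
  · simp [PySem.Set.add, PySem.Set.contains, h]
  · simp [PySem.Set.add, PySem.Set.contains, h]

-- folding `d[bc].add(f y)` over a list, once bc is present, only rewrites bc's value in place
lemma pv_modify_insert_fold {α : Type} (f : α → String) (vs : List α)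
    (d : PySem.Dict String (PySem.Set String)) (bc : String) (s : PySem.Set String) :
    vs.foldl (fun d y => d.modify bc [] (fun t => PySem.Set.add t (f y))) (d.insert bc s)
      = d.insert bc (vs.foldl (fun t y => PySem.Set.add t (f y)) s) := by
  induction vs generalizing s with
  | nil => rfl
  | cons y ys ih =>
    have h1 : (d.insert bc s).modify bc [] (fun t => PySem.Set.add t (f y)) = d.insert bc (PySem.Set.add s (f y)) := by
      show (d.insert bc s).insert bc (PySem.Set.add ((d.insert bc s).getD bc []) (f y)) = _
      rw [PySem.Dict.getD_insert_self, PySem.Dict.insert_insert_self]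
    simp only [List.foldl_cons, h1, ih]

-- A's first pass on a list of fresh distinct keys appends (bc, set-of-variants) pairs in order
lemma pv_make_items (combos : List (List Int)) (hne : combos ≠ []) :
    ∀ (keys : List String) (d : PySem.Dict String (PySem.Set String)), keys.Nodup →
      (∀ bc ∈ keys, d.contains bc = false) →
      (keys.foldl (fun d bc => combos.foldl
          (fun d y => d.modify bc [] (fun s => PySem.Set.add s (pvVariantA bc y))) d) d).items
        = d.items ++ keys.map (fun bc => (bc, PySem.Set.ofList (combos.map (pvVariantA bc)))) := by
  intro keys
  induction keys with
  | nil => intro d _ _; simp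
  | cons bc ks ih =>
    intro d hnd hc
    obtain ⟨y0, rest, rfl⟩ : ∃ y0 rest, combos = y0 :: rest := by
      cases combos with
      | nil => exact absurd rfl hne
      | cons a b => exact ⟨a, b, rfl⟩
    have hbc : d.contains bc = false := hc bc (List.mem_cons_self)
    have h1 : d.modify bc [] (fun s => PySem.Set.add s (pvVariantA bc y0))
        = d.insert bc [pvVariantA bc y0] := by
      show d.insert bc (PySem.Set.add (d.getD bc []) (pvVariantA bc y0)) = _
      rw [PySem.Dict.getD_of_not_contains d [] hbc]
      rfl
    have hinner : ((y0 :: rest).foldl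
        (fun d y => d.modify bc [] (fun s => PySem.Set.add s (pvVariantA bc y))) d)
        = d.insert bc (PySem.Set.ofList ((y0 :: rest).map (pvVariantA bc))) := by
      rw [List.foldl_cons, h1, pv_modify_insert_fold]
      rw [PySem.Set.ofList_eq_foldl, List.foldl_map, List.foldl_cons]
      rfl
    rw [List.foldl_cons, hinner, ih]
    · rw [PySem.Dict.items_insert_of_not_contains d _ hbc]
      simp
    · exact hnd.of_cons
    · intro k hk
      have hkne : k ≠ bc := fun h => (List.nodup_cons.mp hnd).1 (h ▸ hk)
      rw [PySem.Dict.contains_insert]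
      simp [hkne, hc k (List.mem_cons_of_mem _ hk)]

-- one key's variant pass on the inverted dict, read back at any variant v
lemma pv_inner_getD (bc : String) :
    ∀ (vs : List String) (d : PySem.Dict String (List String)) (v : String),
      (vs.foldl (fun d i => d.modify i [] (fun s => PySem.Set.add s bc)) d).getD v []
        = if v ∈ vs ∧ bc ∉ d.getD v [] then d.getD v [] ++ [bc] else d.getD v [] := by
  intro vs
  induction vs with
  | nil => intro d v; simp
  | cons w ws ih =>
    intro d v
    rw [List.foldl_cons, ih]
    have hmod : ∀ u, (d.modify w [] (fun s => PySem.Set.add s bc)).getD u []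
        = if u = w then PySem.Set.add (d.getD w []) bc else d.getD u [] :=
      fun u => by rw [PySem.Dict.getD_modify]
    by_cases hvw : v = w
    · subst hvw
      rw [hmod v, if_pos rfl]
      by_cases hin : bc ∈ d.getD v []
      · have hadd : PySem.Set.add (d.getD v []) bc = d.getD v [] := by
          simp [PySem.Set.add, PySem.Set.contains, hin]
        simp [hin]
      · have hadd : PySem.Set.add (d.getD v []) bc = d.getD v [] ++ [bc] := by
          simp [PySem.Set.add, PySem.Set.contains, hin]
        simp [hin]
    · rw [hmod v, if_neg hvw]
      simp [List.mem_cons, hvw]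

-- A's inverted dict, built over distinct fresh keys, read at v is exactly the filter of the keys
lemma pv_invrt_getD (S : String → List String) :
    ∀ (keys : List String), keys.Nodup →
      ∀ (d : PySem.Dict String (List String)), (∀ v b, b ∈ d.getD v [] → b ∉ keys) →
      ∀ v, (keys.foldl (fun d bc => (S bc).foldl
              (fun d i => d.modify i [] (fun s => PySem.Set.add s bc)) d) d).getD v []
        = d.getD v [] ++ keys.filter (fun k => decide (v ∈ S k)) := by
  intro keys
  induction keys with
  | nil => intro _ d _ v; simp
  | cons bc ks ih =>
    intro hnd d hinv v
    rw [List.foldl_cons, ih hnd.of_cons]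
    · have hbc : bc ∉ d.getD v [] := fun h => hinv v bc h (List.mem_cons_self)
      rw [pv_inner_getD]
      by_cases hv : v ∈ S bc
      · simp [hv, hbc]
      · simp [hv]
    · intro u b hb hbks
      rw [pv_inner_getD] at hb
      by_cases hcond : u ∈ S bc ∧ bc ∉ d.getD u []
      · rw [if_pos hcond] at hb
        rcases List.mem_append.mp hb with h1 | h2
        · exact hinv u b h1 (List.mem_cons_of_mem _ hbks)
        · have : b = bc := by simpa using h2
          exact (List.nodup_cons.mp hnd).1 (this ▸ hbks)
      · rw [if_neg hcond] at hb
        exact hinv u b hb (List.mem_cons_of_mem _ hbks)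

-- B's guarded scan is the fold of `add` over the filtered list
lemma pv_guard_fold (v : String) :
    ∀ (l : List (String × List String)) (g : PySem.Set String),
      l.foldl (fun g q => if v ∈ q.2 then PySem.Set.add g q.1 else g) g
        = (l.filter (fun q => decide (v ∈ q.2))).foldl (fun g q => PySem.Set.add g q.1) g := by
  intro l
  induction l with
  | nil => intro g; rfl
  | cons q qs ih =>
    intro g
    by_cases h : v ∈ q.2
    · simp [h, ih]
    · simp [h, ih]

-- a fold that ignores its elements is the identity
lemma pv_foldl_id {α β : Type} (l : List α) (d : β) : l.foldl (fun d _ => d) d = d := by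
  induction l with
  | nil => rfl
  | cons a as ih => simp only [List.foldl_cons]; exact ih

-- ===== VERDICT (by name: the statement is the Claim_ definition above) =====
theorem get_barcodes2merge_spec : Claim_equal_get_barcodes2merge := by
  intro barcodes x _ hpre
  unfold Spec_get_barcodes2merge get_barcodes2merge get_barcodes2merge_alt make_N_minus_X_barcodes
  simp only []
  generalize hK : PySem.List.dedup (List.map Prod.fst barcodes) = keys
  generalize hC : pyCombinations (PySem.List.pyRange 0 8) x.toNat = combos
  have hnd : keys.Nodup := hK ▸ PySem.List.nodup_dedup _
  by_cases hc : combos = []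
  · subst hc
    simp only [List.foldl_nil, pv_foldl_id, if_pos]
    rfl
  · rw [if_neg hc]
    have hitems' : (keys.foldl (fun d bc => combos.foldl
        (fun d y => d.modify bc [] (fun s => PySem.Set.add s (pvVariantA bc y))) d) PySem.Dict.empty).items
        = keys.map (fun bc => (bc, PySem.Set.ofList (combos.map (pvVariantA bc)))) := by
      rw [pv_make_items combos hc keys PySem.Dict.empty hnd
        (fun bc _ => PySem.Dict.contains_empty bc)]
      rfl
    rw [hitems']
    -- the inverted dict, read at any v, is the filter of the keys
    have hinvA : ∀ v, ((keys.map (fun bc => (bc, PySem.Set.ofList (combos.map (pvVariantA bc))))).foldl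
        (fun d kv => kv.2.foldl (fun d i => d.modify i [] (fun s => PySem.Set.add s kv.1)) d)
        PySem.Dict.empty).getD v []
        = keys.filter (fun k => decide (v ∈ PySem.Set.ofList (combos.map (pvVariantA k)))) := by
      intro v
      rw [List.foldl_map]
      rw [pv_invrt_getD (fun bc => PySem.Set.ofList (combos.map (pvVariantA bc))) keys hnd
        PySem.Dict.empty (by
          intro u b hb
          rw [PySem.Dict.getD_of_not_contains _ [] (PySem.Dict.contains_empty u)] at hb
          exact absurd hb (List.not_mem_nil)) v]
      rw [PySem.Dict.getD_of_not_contains _ [] (PySem.Dict.contains_empty v), List.nil_append]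
    rw [PySem.List.foldl_append_singleton_eq_map, List.nil_append, List.map_map, List.map_map]
    refine List.map_congr_left ?_
    intro bc _
    simp only [Function.comp]
    rw [pv_varsB_eq]
    refine List.foldl_ext _ _ _ ?_
    intro s v _
    rw [hinvA v, pv_guard_fold, List.filter_map, List.foldl_map]
    refine congrArg (fun L => List.foldl (fun g k => PySem.Set.add g k) s L) ?_
    refine List.filter_congr ?_
    intro k _
    simp only [Function.comp_apply, pv_varsB_eq]
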